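-- pv_equiv track=rewrite | github.com/derRuedi/Advent-of-Code | 2020/day17.py | create_points_in_tesseract
-- ===== SOURCE A (Python) =====
-- def create_points_in_tesseract(tesseract):
-- 	tesseract_size = range(0, len(tesseract))
-- 	points = []
--
-- 	for w in tesseract_size:
-- 		for z in tesseract_size:
-- 			for y in tesseract_size:
-- 				for x in tesseract_size:
-- 					points.append( [x, y, z, w] )
-- 	return points
-- ===== SOURCE B (Python) =====
-- def create_points_in_tesseract(tesseract):
--     n = len(tesseract)
--     points = []
--     for i in range(n ** 4):
--         points.append([i % n, (i // n) % n, (i // n ** 2) % n, i // n ** 3])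
--     return points
-- ===== Notes on version B (the rewrite author's own statement) =====
-- stated objective: alternative
-- what changed: Replaces the four nested loops with a single flat loop over range(n**4) that decodes the four coordinates of each point by index arithmetic (mod/div).
import Mathlib
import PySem

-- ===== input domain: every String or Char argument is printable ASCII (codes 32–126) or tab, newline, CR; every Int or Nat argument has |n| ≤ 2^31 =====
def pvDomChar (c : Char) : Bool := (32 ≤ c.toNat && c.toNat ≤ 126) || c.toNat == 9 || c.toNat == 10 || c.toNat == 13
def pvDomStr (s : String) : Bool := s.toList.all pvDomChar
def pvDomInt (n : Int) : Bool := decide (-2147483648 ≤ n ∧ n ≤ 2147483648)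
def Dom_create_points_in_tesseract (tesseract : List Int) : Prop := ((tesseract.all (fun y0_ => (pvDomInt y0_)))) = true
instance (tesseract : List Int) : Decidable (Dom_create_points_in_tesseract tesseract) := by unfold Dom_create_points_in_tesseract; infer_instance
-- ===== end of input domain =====

-- B replaces the four nested loops with one flat loop over range(n**4) that decodes
-- each point's coordinates by index arithmetic (alternative decomposition, same cost).

-- ===== PORT A =====
def create_points_in_tesseract (tesseract : List Int) : List (List Int) :=
  let tesseract_size := PySem.List.pyRange 0 (tesseract.length : Int) 1
  tesseract_size.foldl (fun points w =>
    tesseract_size.foldl (fun points z =>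
      tesseract_size.foldl (fun points y =>
        tesseract_size.foldl (fun points x =>
          points ++ [[x, y, z, w]]) points) points) points) []

-- ===== PORT B =====
def create_points_in_tesseract_alt (tesseract : List Int) : List (List Int) :=
  let n : Int := (tesseract.length : Int)
  (PySem.List.pyRange 0 (n ^ 4) 1).foldl (fun points i =>
    points ++ [[PySem.Int.mod i n,
                PySem.Int.mod (PySem.Int.floordiv i n) n,
                PySem.Int.mod (PySem.Int.floordiv i (n ^ 2)) n,
                PySem.Int.floordiv i (n ^ 3)]]) []

-- ===== PRECONDITION & SPEC =====
def Spec_create_points_in_tesseract (tesseract : List Int) (out : List (List Int)) : Prop := out = create_points_in_tesseract_alt tesseract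
instance (tesseract : List Int) (out : List (List Int)) : Decidable (Spec_create_points_in_tesseract tesseract out) := by unfold Spec_create_points_in_tesseract; infer_instance

-- ===== CLAIM (what is proved, stated in full; the proofs are below) =====
def Claim_equal_create_points_in_tesseract : Prop := ∀ (tesseract : List Int), Dom_create_points_in_tesseract tesseract → Spec_create_points_in_tesseract tesseract (create_points_in_tesseract tesseract)

-- ===== LEMMAS AND PROOFS =====

-- range(b*m) split into m consecutive blocks of size b
theorem pv_range_mul_flatMap {α : Type} (b m : Nat) (f : Nat → α) :
    (List.range (b * m)).map f
      = (List.range m).flatMap (fun j => (List.range b).map (fun i => f (b * j + i))) := by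
  induction m with
  | zero => simp
  | succ m ih =>
      rw [Nat.mul_succ, List.range_add, List.map_append, ih,
          List.range_succ, List.flatMap_append]
      simp [Nat.add_comm]

-- decoding the flat index recovers the four coordinates
theorem pv_decode (n x y z w : Nat) (hx : x < n) (hy : y < n) (hz : z < n) (hw : w < n) :
    ([PySem.Int.mod ((n ^ 3 * w + (n ^ 2 * z + (n * y + x)) : Nat) : Int) (n : Int),
      PySem.Int.mod (PySem.Int.floordiv ((n ^ 3 * w + (n ^ 2 * z + (n * y + x)) : Nat) : Int) (n : Int)) (n : Int),
      PySem.Int.mod (PySem.Int.floordiv ((n ^ 3 * w + (n ^ 2 * z + (n * y + x)) : Nat) : Int) ((n : Int) ^ 2)) (n : Int),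
      PySem.Int.floordiv ((n ^ 3 * w + (n ^ 2 * z + (n * y + x)) : Nat) : Int) ((n : Int) ^ 3)]
      : List Int)
      = [(x : Int), (y : Int), (z : Int), (w : Int)] := by
  have hn : 0 < n := by omega
  set M : Nat := n ^ 3 * w + (n ^ 2 * z + (n * y + x)) with hM
  have hgrp : M = n * (n * (n * w + z) + y) + x := by rw [hM]; ring
  have h2 : ((n : Int)) ^ 2 = ((n ^ 2 : Nat) : Int) := by push_cast; ring
  have h3 : ((n : Int)) ^ 3 = ((n ^ 3 : Nat) : Int) := by push_cast; ring
  rw [h2, h3]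
  simp only [PySem.Int.mod_natCast, PySem.Int.floordiv_natCast]
  have hd1 : M / n = n * (n * w + z) + y := by
    rw [hgrp, Nat.mul_add_div hn, Nat.div_eq_of_lt hx, Nat.add_zero]
  have hd2 : M / n ^ 2 = n * w + z := by
    rw [show n ^ 2 = n * n by ring, ← Nat.div_div_eq_div_mul, hd1, Nat.mul_add_div hn,
        Nat.div_eq_of_lt hy, Nat.add_zero]
  have hd3 : M / n ^ 3 = w := by
    rw [show n ^ 3 = n ^ 2 * n by ring, ← Nat.div_div_eq_div_mul, hd2, Nat.mul_add_div hn,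
        Nat.div_eq_of_lt hz, Nat.add_zero]
  have hm1 : M % n = x := by
    rw [hgrp, Nat.mul_add_mod, Nat.mod_eq_of_lt hx]
  have hm2 : (n * (n * w + z) + y) % n = y := by
    rw [Nat.mul_add_mod, Nat.mod_eq_of_lt hy]
  have hm3 : (n * w + z) % n = z := by
    rw [Nat.mul_add_mod, Nat.mod_eq_of_lt hz]
  rw [hm1, hd1, hm2, hd2, hm3, hd3]

-- flatMap congruence on members
theorem pv_flatMap_congr {α β : Type} (l : List α) (f g : α → List β)
    (h : ∀ x ∈ l, f x = g x) : l.flatMap f = l.flatMap g := by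
  induction l with
  | nil => rfl
  | cons a t ih =>
      simp only [List.flatMap_cons]
      rw [h a (by simp), ih (fun x hx => h x (by simp [hx]))]

-- ===== VERDICT (by name: the statement is the Claim_ definition above) =====
theorem create_points_in_tesseract_spec : Claim_equal_create_points_in_tesseract := by
  intro tesseract _
  unfold Spec_create_points_in_tesseract create_points_in_tesseract create_points_in_tesseract_alt
  set n := tesseract.length with hn
  simp only [PySem.List.foldl_append_singleton_eq_map, PySem.List.foldl_append_eq_flatMap,
    List.nil_append]
  have hpow : ((n : Int)) ^ 4 = ((n ^ 4 : Nat) : Int) := by push_cast; ring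
  rw [hpow, PySem.List.pyRange_zero_natCast, PySem.List.pyRange_zero_natCast]
  simp only [List.flatMap_map, List.map_map]
  rw [show n ^ 4 = n ^ 3 * n by ring, pv_range_mul_flatMap]
  refine pv_flatMap_congr _ _ _ (fun w hw => ?_)
  rw [show n ^ 3 = n ^ 2 * n by ring, pv_range_mul_flatMap]
  refine pv_flatMap_congr _ _ _ (fun z hz => ?_)
  rw [show n ^ 2 = n * n by ring, pv_range_mul_flatMap]
  refine pv_flatMap_congr _ _ _ (fun y hy => ?_)
  refine List.map_congr_left (fun x hx => ?_)
  simp only [List.mem_range] at hw hz hy hx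
  simp only [Function.comp]
  rw [show n * n * n * w + (n * n * z + (n * y + x))
        = n ^ 3 * w + (n ^ 2 * z + (n * y + x)) by ring]
  exact (pv_decode n x y z w hx hy hz hw).symm
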